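-- pv_equiv track=rewrite | github.com/hack2skill/intel-oneAPI | question1.py | maximize_points
-- ===== SOURCE A (Python) =====
-- def maximize_points(num_markers, markers):
--     markers.sort(reverse=True)  # Sort marker values in descending order
--     JamesScore = 0
--     BobScore = 0
--     turn = 0  # 0 for James, 1 for Bob
--
--     while markers:
--         if turn == 0:  # James' turn
--             if markers[0] >= markers[-1]:
--                 JamesScore += markers.pop(0)
--             else:
--                 JamesScore += markers.pop()
--             turn = 1  # Bob's turn
--         else:  # Bob's turn
--             if markers[0] >= markers[-1]:
--                 BobScore += markers.pop(0)
--             else: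
--                 BobScore += markers.pop()
--             turn = 0  # James' turn
--
--     return JamesScore
-- ===== SOURCE B (Python) =====
-- def maximize_points(num_markers, markers):
--     # Note: like A, sorts `markers` in place (same observable mutation).
--     markers.sort(reverse=True)
--     return sum(markers[::2])
-- ===== Notes on version B (the rewrite author's own statement) =====
-- stated objective: faster
-- what changed: Replaces the turn-taking while loop with pop(0)/pop() (each pop(0) is O(n)) by a direct sum of the even-index elements of the descending-sorted list.
import Mathlib
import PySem

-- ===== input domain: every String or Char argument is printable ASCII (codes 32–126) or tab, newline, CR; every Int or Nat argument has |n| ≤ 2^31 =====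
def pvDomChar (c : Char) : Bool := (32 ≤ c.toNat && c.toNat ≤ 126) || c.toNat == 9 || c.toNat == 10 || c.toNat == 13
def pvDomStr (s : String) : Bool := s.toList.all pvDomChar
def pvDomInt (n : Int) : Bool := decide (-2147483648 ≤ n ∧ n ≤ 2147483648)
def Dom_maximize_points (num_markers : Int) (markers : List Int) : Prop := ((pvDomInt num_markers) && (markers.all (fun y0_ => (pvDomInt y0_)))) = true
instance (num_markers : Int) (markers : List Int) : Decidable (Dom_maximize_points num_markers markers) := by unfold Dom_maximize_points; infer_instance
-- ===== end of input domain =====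

-- B replaces A's O(n^2) pop-alternating loop by summing the even-index elements of the
-- descending-sorted list (return-value equivalence; both sort `markers` in place in Python).


-- ===== PORT A =====
-- the while loop: state (markers, JamesScore, BobScore, turn)
def pvLoopA : List Int → Int → Int → Int → Int
  | [], j, _, _ => j
  | x :: xs, j, b, t =>
    let lst := (x :: xs).getLast (by simp)   -- markers[-1] (list nonempty here)
    if t == 0 then
      if x ≥ lst then pvLoopA xs (j + x) b 1
      else pvLoopA (x :: xs).dropLast (j + lst) b 1
    else
      if x ≥ lst then pvLoopA xs j (b + x) 0
      else pvLoopA (x :: xs).dropLast j (b + lst) 0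
termination_by l => l.length
decreasing_by all_goals simp [List.length_dropLast]

def maximize_points (num_markers : Int) (markers : List Int) : Int :=
  pvLoopA (PySem.List.sorted markers (fun x => x) true) 0 0 0

-- ===== PORT B =====
-- markers[::2] — step-2 slice, ported by hand (exact: even indices in order)
def pvEveryOther : List Int → List Int
  | [] => []
  | [x] => [x]
  | x :: _ :: r => x :: pvEveryOther r

def maximize_points_alt (num_markers : Int) (markers : List Int) : Int :=
  (pvEveryOther (PySem.List.sorted markers (fun x => x) true)).sum

-- ===== PRECONDITION & SPEC =====
def Spec_maximize_points (num_markers : Int) (markers : List Int) (out : Int) : Prop := out = maximize_points_alt num_markers markers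
instance (num_markers : Int) (markers : List Int) (out : Int) : Decidable (Spec_maximize_points num_markers markers out) := by unfold Spec_maximize_points; infer_instance

-- ===== CLAIM (what is proved, stated in full; the proofs are below) =====
def Claim_equal_maximize_points : Prop := ∀ (num_markers : Int) (markers : List Int), Dom_maximize_points num_markers markers → Spec_maximize_points num_markers markers (maximize_points num_markers markers)

-- ===== LEMMAS AND PROOFS =====
theorem pvEveryOther_cons (x : Int) (xs : List Int) :
    pvEveryOther (x :: xs) = x :: pvEveryOther xs.tail := by
  cases xs <;> simp [pvEveryOther]

-- on a descending list the loop always pops the front; James collects even indices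
theorem pvLoopA_sorted (l : List Int) (hp : l.Pairwise (fun a b => b ≤ a)) :
    (∀ j b, pvLoopA l j b 0 = j + (pvEveryOther l).sum) ∧
    (∀ j b, pvLoopA l j b 1 = j + (pvEveryOther l.tail).sum) := by
  induction l with
  | nil => simp [pvLoopA, pvEveryOther]
  | cons x xs ih =>
    have hx : ∀ y ∈ xs, y ≤ x := (List.pairwise_cons.mp hp).1
    have hxs : xs.Pairwise (fun a b => b ≤ a) := (List.pairwise_cons.mp hp).2
    have hge : x ≥ (x :: xs).getLast (by simp) := by
      have hmem := List.getLast_mem (l := x :: xs) (by simp)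
      rcases List.mem_cons.mp hmem with h | h
      · omega
      · exact hx _ h
    obtain ⟨ih0, ih1⟩ := ih hxs
    constructor
    · intro j b
      rw [pvLoopA]
      simp only [if_pos hge]
      norm_num [ih1, pvEveryOther_cons, add_assoc]
    · intro j b
      rw [pvLoopA]
      simp only [if_pos hge]
      norm_num [ih0]

-- ===== VERDICT (by name: the statement is the Claim_ definition above) =====
theorem maximize_points_spec : Claim_equal_maximize_points := by
  intro n markers _
  unfold Spec_maximize_points maximize_points maximize_points_alt
  have hp := PySem.List.sorted_pairwise_rev (xs := markers) (key := fun x => x)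
  have := (pvLoopA_sorted _ hp).1 0 0
  simpa using this
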